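-- pv_equiv track=rewrite | github.com/yfling21/EasySTM | utils.py | find_abs_idx
-- ===== SOURCE A (Python) =====
-- def find_abs_idx(track_list, alive_list, relative_idx_left):
--     abs_idx = []
--     for i in range(len(track_list)):
--         if i not in alive_list:
--             continue
--         if track_list[i][-1][0] == relative_idx_left:
--             abs_idx.append(i)
--     return abs_idx
-- ===== SOURCE B (Python) =====
-- def find_abs_idx(track_list, alive_list, relative_idx_left):
--     cands = {i for i in alive_list if 0 <= i < len(track_list)}
--     return [i for i in sorted(cands) if track_list[i][-1][0] == relative_idx_left]
-- ===== Notes on version B (the rewrite author's own statement) =====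
-- stated objective: faster
-- what changed: B iterates the sorted set of in-range alive indices and filters by the last-row test, instead of scanning every track index and doing an O(|alive|) membership test per index.
import Mathlib
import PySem

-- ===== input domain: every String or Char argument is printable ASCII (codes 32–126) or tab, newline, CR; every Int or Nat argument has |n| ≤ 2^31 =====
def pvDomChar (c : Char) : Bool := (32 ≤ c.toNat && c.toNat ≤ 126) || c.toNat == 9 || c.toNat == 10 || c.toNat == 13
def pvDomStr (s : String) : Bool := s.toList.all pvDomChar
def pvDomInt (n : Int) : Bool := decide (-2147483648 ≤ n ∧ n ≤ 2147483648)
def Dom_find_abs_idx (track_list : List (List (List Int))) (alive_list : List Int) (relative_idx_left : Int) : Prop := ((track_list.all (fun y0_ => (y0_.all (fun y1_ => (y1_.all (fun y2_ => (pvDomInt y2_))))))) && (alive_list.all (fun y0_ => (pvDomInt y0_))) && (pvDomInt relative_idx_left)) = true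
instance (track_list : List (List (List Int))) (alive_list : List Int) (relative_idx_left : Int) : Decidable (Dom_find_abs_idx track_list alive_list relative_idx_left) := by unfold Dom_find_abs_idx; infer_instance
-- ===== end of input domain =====

-- B iterates the sorted set of in-range alive indices instead of scanning every track index with a per-index membership test; return value proved equal on Pre_.


-- shared accessor: track_list[i][-1][0] == relative_idx_left (none where Python raises IndexError; Pre_ excludes that)
def pvHit (track_list : List (List (List Int))) (r i : Int) : Bool :=
  (((PySem.List.pyGet? track_list i).bind (fun t => PySem.List.pyGet? t (-1))).bind
    (fun row => PySem.List.pyGet? row 0)) == some r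

-- ===== PORT A =====
def find_abs_idx (track_list : List (List (List Int))) (alive_list : List Int) (relative_idx_left : Int) : List Int :=
  (List.range track_list.length).foldl
    (fun abs_idx i =>
      if alive_list.contains (((i : Nat) : Int)) then
        (if pvHit track_list relative_idx_left (((i : Nat) : Int)) then abs_idx ++ [((i : Nat) : Int)] else abs_idx)
      else abs_idx) []

-- ===== PORT B =====
def find_abs_idx_alt (track_list : List (List (List Int))) (alive_list : List Int) (relative_idx_left : Int) : List Int :=
  (PySem.List.sorted
      (PySem.Set.ofList (alive_list.filter (fun i => decide (0 ≤ i) && decide (i < (track_list.length : Int)))))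
      (fun x => x) false).filter (fun i => pvHit track_list relative_idx_left i)

-- ===== PRECONDITION & SPEC =====
-- Pre_ excludes exactly the inputs where Python A raises IndexError: an alive in-range index whose track, or whose track's last row, is empty.
def Pre_find_abs_idx (track_list : List (List (List Int))) (alive_list : List Int) (relative_idx_left : Int) : Prop :=
  ∀ i ∈ List.range track_list.length, (((i : Nat) : Int)) ∈ alive_list →
    track_list.getD i [] ≠ [] ∧ (track_list.getD i []).getLastD [] ≠ []
instance (track_list : List (List (List Int))) (alive_list : List Int) (relative_idx_left : Int) : Decidable (Pre_find_abs_idx track_list alive_list relative_idx_left) := by unfold Pre_find_abs_idx; infer_instance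
def pvWitness_find_abs_idx : List (List (List Int)) × List Int × Int := ([[[0]]], [0], 0)
def Spec_find_abs_idx (track_list : List (List (List Int))) (alive_list : List Int) (relative_idx_left : Int) (out : List Int) : Prop := out = find_abs_idx_alt track_list alive_list relative_idx_left
instance (track_list : List (List (List Int))) (alive_list : List Int) (relative_idx_left : Int) (out : List Int) : Decidable (Spec_find_abs_idx track_list alive_list relative_idx_left out) := by unfold Spec_find_abs_idx; infer_instance

-- ===== CLAIM (what is proved, stated in full; the proofs are below) =====
def Claim_equal_find_abs_idx : Prop := ∀ (track_list : List (List (List Int))) (alive_list : List Int) (relative_idx_left : Int), Dom_find_abs_idx track_list alive_list relative_idx_left → Pre_find_abs_idx track_list alive_list relative_idx_left → Spec_find_abs_idx track_list alive_list relative_idx_left (find_abs_idx track_list alive_list relative_idx_left)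

-- ===== LEMMAS AND PROOFS =====

-- A's loop as a filter-then-map
theorem findA_eq (tl : List (List (List Int))) (al : List Int) (r : Int) :
    find_abs_idx tl al r
      = ((List.range tl.length).filter
          (fun i => al.contains (((i : Nat) : Int)) && pvHit tl r (((i : Nat) : Int)))).map (fun (i : Nat) => (i : Int)) := by
  unfold find_abs_idx
  have h : (fun (abs_idx : List Int) (i : Nat) =>
      if al.contains (((i : Nat) : Int)) then
        (if pvHit tl r (((i : Nat) : Int)) then abs_idx ++ [((i : Nat) : Int)] else abs_idx)
      else abs_idx)
    = (fun abs_idx i =>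
        if al.contains (((i : Nat) : Int)) && pvHit tl r (((i : Nat) : Int)) then abs_idx ++ [((i : Nat) : Int)] else abs_idx) := by
    funext acc i
    by_cases h1 : (((i : Nat) : Int)) ∈ al <;> by_cases h2 : pvHit tl r (((i : Nat) : Int)) <;> simp [h1, h2]
  rw [h, PySem.List.foldl_append_if]
  simp

theorem incr_pairwise (tl : List (List (List Int))) (al : List Int) :
    (((List.range tl.length).map (fun (i : Nat) => (i : Int))).filter (fun j => al.contains j)).Pairwise (· < ·) := by
  refine List.Pairwise.filter _ ?_
  rw [List.pairwise_map]
  exact (List.pairwise_lt_range).imp (fun h => by exact_mod_cast h)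

-- the increasing list of in-range alive indices
theorem sorted_cands_eq (tl : List (List (List Int))) (al : List Int) :
    PySem.List.sorted (PySem.Set.ofList (al.filter (fun i => decide (0 ≤ i) && decide (i < (tl.length : Int))))) (fun x => x) false
      = ((List.range tl.length).map (fun (i : Nat) => (i : Int))).filter (fun j => al.contains j) := by
  apply PySem.List.sorted_eq_of_perm_of_pairwise_lt
  · rw [List.perm_ext_iff_of_nodup ((incr_pairwise tl al).nodup) (PySem.Set.nodup_ofList _)]
    intro j
    simp only [List.mem_filter, List.mem_map, List.mem_range, PySem.Set.mem_ofList,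
      Bool.and_eq_true, decide_eq_true_eq, List.contains_iff_mem]
    constructor
    · rintro ⟨⟨i, hi, rfl⟩, hmem⟩
      exact ⟨hmem, by simp, by exact_mod_cast hi⟩
    · rintro ⟨hmem, h0, hlt⟩
      exact ⟨⟨j.toNat, by omega, by omega⟩, hmem⟩
  · exact incr_pairwise tl al

-- ===== VERDICT (by name: the statement is the Claim_ definition above) =====
theorem find_abs_idx_spec : Claim_equal_find_abs_idx := by
  intro tl al r _ _
  unfold Spec_find_abs_idx find_abs_idx_alt
  rw [sorted_cands_eq, findA_eq, List.filter_filter, List.filter_map]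
  congr 1
  apply List.filter_congr
  intro i _
  simp [Bool.and_comm]
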